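-- pv_equiv track=rewrite | github.com/KarlisFre/diffusion-factorization | data/factoring_dataset.py | decode_num
-- ===== SOURCE A (Python) =====
-- def decode_num(num_list):
--     num = 0
--     mult = 1
--     for c in num_list:
--         c = int(c)  # to use long python ints
--         # if c==0: break
--         if not c in range(0, 2): raise Exception("invalid number")
--         num += (c - 0) * mult
--         mult *= 2
--
--     return num
-- ===== SOURCE B (Python) =====
-- def decode_num(num_list):
--     num = 0
--     for c in reversed(num_list):
--         c = int(c)
--         if not c in range(0, 2): raise Exception("invalid number")
--         num = num * 2 + c
--     return num
-- ===== Notes on version B (the rewrite author's own statement) =====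
-- stated objective: simpler
-- what changed: Horner's rule over the reversed list (num = num*2 + c, most-significant digit first) replaces the power-of-two multiplier accumulator; the per-digit validation and exception are kept.
import Mathlib
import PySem

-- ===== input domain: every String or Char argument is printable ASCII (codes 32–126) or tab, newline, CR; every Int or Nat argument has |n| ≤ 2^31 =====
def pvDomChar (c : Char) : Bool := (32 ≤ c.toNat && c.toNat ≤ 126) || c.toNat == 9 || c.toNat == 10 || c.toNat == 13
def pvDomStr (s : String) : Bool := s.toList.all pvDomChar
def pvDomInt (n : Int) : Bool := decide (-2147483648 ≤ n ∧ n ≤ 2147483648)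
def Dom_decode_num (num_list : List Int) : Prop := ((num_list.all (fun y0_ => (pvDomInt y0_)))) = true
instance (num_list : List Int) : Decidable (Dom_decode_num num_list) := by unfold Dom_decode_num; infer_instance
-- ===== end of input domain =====

-- B changes the decomposition: Horner's rule over the reversed list instead of a power-of-two multiplier accumulator.
-- Both raise on invalid digits; Pre_ excludes exactly the inputs where the Python raises.

-- ===== PORT A =====
-- A's loop carries state (num, mult); on a digit outside {0,1} Python raises,
-- which Pre_ excludes, so the port keeps the state unchanged on that (unreached) branch.
def decode_num (num_list : List Int) : Int :=
  (num_list.foldl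
    (fun (s : Int × Int) c =>
      if ¬ (0 ≤ c ∧ c < 2) then s
      else (s.1 + (c - 0) * s.2, s.2 * 2)) (0, 1)).1

-- ===== PORT B =====
-- B's loop: Horner over the reversed list; the raising branch is likewise unreached inside Pre_.
def decode_num_alt (num_list : List Int) : Int :=
  num_list.reverse.foldl
    (fun num c => if ¬ (0 ≤ c ∧ c < 2) then num else num * 2 + c) 0

-- ===== PRECONDITION & SPEC =====
-- Pre_ excludes exactly the inputs on which Python A raises Exception("invalid number").
def Pre_decode_num (num_list : List Int) : Prop := ∀ c ∈ num_list, c = 0 ∨ c = 1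
instance (num_list : List Int) : Decidable (Pre_decode_num num_list) := by unfold Pre_decode_num; infer_instance
def pvWitness_decode_num : List Int := [1, 0, 1, 1]

def Spec_decode_num (num_list : List Int) (out : Int) : Prop := out = decode_num_alt num_list
instance (num_list : List Int) (out : Int) : Decidable (Spec_decode_num num_list out) := by unfold Spec_decode_num; infer_instance

-- ===== CLAIM (what is proved, stated in full; the proofs are below) =====
def Claim_equal_decode_num : Prop := ∀ (num_list : List Int), Dom_decode_num num_list → Pre_decode_num num_list → Spec_decode_num num_list (decode_num num_list)

-- ===== LEMMAS AND PROOFS =====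

-- little-endian value of a binary digit list
def pvVal : List Int → Int
  | [] => 0
  | c :: t => c + 2 * pvVal t

theorem pvA_foldl (l : List Int) (num mult : Int)
    (h : ∀ c ∈ l, c = 0 ∨ c = 1) :
    (l.foldl
      (fun (s : Int × Int) c =>
        if ¬ (0 ≤ c ∧ c < 2) then s
        else (s.1 + (c - 0) * s.2, s.2 * 2)) (num, mult)).1
      = num + mult * pvVal l := by
  induction l generalizing num mult with
  | nil => simp [pvVal]
  | cons c t ih =>
    have hc : 0 ≤ c ∧ c < 2 := by rcases h c (by simp) with h0 | h1 <;> omega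
    simp only [List.foldl, if_neg (not_not_intro hc)]
    rw [ih _ _ (fun x hx => h x (by simp [hx]))]
    simp [pvVal]; ring

theorem pvB_foldr (l : List Int) (h : ∀ c ∈ l, c = 0 ∨ c = 1) :
    l.foldr (fun c num => if ¬ (0 ≤ c ∧ c < 2) then num else num * 2 + c) 0
      = pvVal l := by
  induction l with
  | nil => simp [pvVal]
  | cons c t ih =>
    have hc : 0 ≤ c ∧ c < 2 := by rcases h c (by simp) with h0 | h1 <;> omega
    simp only [List.foldr, if_neg (not_not_intro hc)]
    rw [ih (fun x hx => h x (by simp [hx]))]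
    simp [pvVal]; ring

-- ===== VERDICT (by name: the statement is the Claim_ definition above) =====
theorem decode_num_spec : Claim_equal_decode_num := by
  intro num_list _ hpre
  unfold Spec_decode_num decode_num decode_num_alt
  rw [List.foldl_reverse, pvA_foldl _ _ _ hpre, pvB_foldr _ hpre]
  ring
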